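-- pv_equiv track=rewrite | github.com/inv-Ayiba/HackerRank | Euler 254/1.py | summforsg
-- ===== SOURCE A (Python) =====
-- import math
--
-- universalRange=2000
--
-- def f(n):
--     # f(33) = 12 because 3!+3!=12
--     strNum=str(n)
--     sumi=0
--     for i in range(len(strNum)):
--         sumi+=(math.factorial(int(strNum[i])))
--     return(sumi)
--
-- def sf(n):
--     # sf(33) = 3 because f(33)=12, and 1+2=3
--     # sf(5)= 3 because f(5)=120, and 1+2+0=3
--     ff=f(n)
--     strNum=str(ff)
--     sumi=0
--     for i in range(len(strNum)):
--         sumi+=(int(strNum[i]))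
--     return(sumi)
--
-- def gfor(i,r=2500):
--     #smallest int such that sf(n)=i
--     #gfor(11)= 26 because sf(26)=11
--     for n in range(r):
--         if(sf(n)==i and n!=0):
--             #have to remove 0(zero)
--             # return("sf(",n,")=",i)
--
--             return(n)
--
-- def sgfor(i,r=2500):
--     #sum of g(i) digits
--     #sgfor(11)= 8 ,gfor(11)= 26 so 2+6= 8
--     gg=gfor(i,r)
--     strNum=str(gg)
--
--     sumi=0
--     try:
--         for i in range(len(strNum)):
--             sumi+=(int(strNum[i]))
--         return(sumi)
--     except(ValueError):
--         return "error! range r probably too small"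
--
-- def summforsg(ra1,ra2):
--     # sum of from sgfor(ra1) to sgfor(ra2)
--     sum=0
--     worked=150 ##test
--     workedList=[]
--     for k in range(ra1,ra2+1):
--
--         try:
--             grab=sgfor(k,universalRange)
--             if(grab=="error! range r probably too small"):
--                 worked-=1  ##test
--
--
--             sum+= grab
--             workedList.append(k) ##test
--         except(TypeError):
--             continue
--     # return(workedList)
--     return(sum,"  ","worked :",worked,"  at range:",universalRange) ##test
-- ===== SOURCE B (Python) =====
-- import math
--
-- universalRange = 2000
--
-- def _digit_sum(m):
--     # sum of decimal digits of a nonnegative int, via its string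
--     return sum(int(c) for c in str(m))
--
-- def summforsg(ra1, ra2):
--     # Precompute sf(n) for every n in 1..universalRange-1 once and keep, per sf-value,
--     # the smallest preimage n; the outer loop then answers each k with a dict lookup
--     # instead of rescanning the whole range.
--     smallest = {}
--     for n in range(1, universalRange):
--         v = _digit_sum(sum(math.factorial(int(c)) for c in str(n)))
--         if v not in smallest:
--             smallest[v] = n
--     total = 0
--     worked = 150
--     for k in range(ra1, ra2 + 1):
--         n = smallest.get(k)
--         if n is None:
--             worked -= 1
--         else:
--             total += _digit_sum(n)
--     return (total, "  ", "worked :", worked, "  at range:", universalRange)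
-- ===== Notes on version B (the rewrite author's own statement) =====
-- stated objective: alternative
-- what changed: Instead of rescanning range(universalRange) with sf recomputed for every k (A's gfor), B computes sf(n) for n in 1..universalRange-1 once, stores the smallest preimage per sf-value in a dict, and answers each k of the outer loop with one dict lookup.
import Mathlib
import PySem

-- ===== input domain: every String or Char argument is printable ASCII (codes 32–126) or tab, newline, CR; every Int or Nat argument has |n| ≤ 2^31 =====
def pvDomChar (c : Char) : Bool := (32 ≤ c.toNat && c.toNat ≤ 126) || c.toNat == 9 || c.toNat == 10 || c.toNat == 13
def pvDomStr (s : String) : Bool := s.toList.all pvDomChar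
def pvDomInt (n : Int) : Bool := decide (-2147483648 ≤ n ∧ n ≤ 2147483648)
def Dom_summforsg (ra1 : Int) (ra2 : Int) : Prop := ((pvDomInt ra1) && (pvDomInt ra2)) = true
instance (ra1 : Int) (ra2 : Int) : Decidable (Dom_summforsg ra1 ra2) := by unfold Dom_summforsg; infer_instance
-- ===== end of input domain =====

-- B replaces A's per-k rescan of range(universalRange) by ONE precomputation of sf over that
-- range, kept as a dict value -> smallest preimage and looked up once per k.

-- ===== PORT A =====
-- int(strNum[i]) on a one-character string; in both programs the character is always a decimal digit
def chInt (c : Char) : Int := (PySem.Int.ofChars? [c]).getD 0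
-- 'for i in range(len(strNum)): sumi += int(strNum[i])' — digit sum of str(m) (A's sgfor body; Source B's _digit_sum)
def digitSumStr (m : Int) : Int := (PySem.Int.toChars m).foldl (fun s c => s + chInt c) 0
-- A's f: sum of factorials of the digits of str(n); math.factorial of a digit (n is never negative here)
def fP (n : Int) : Int := (PySem.Int.toChars n).foldl (fun s c => s + Int.ofNat (Nat.factorial (chInt c).toNat)) 0
-- A's sf
def sfP (n : Int) : Int := digitSumStr (fP n)
-- A's gfor(i, universalRange): first n in range(2000) with sf(n)==i and n!=0; none = Python's None
def gforA (i : Int) : Option Int :=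
  (PySem.List.pyRange 0 2000 1).find? (fun n => sfP n == i && !(n == 0))
-- A's sgfor: on None, int('N') raises ValueError, caught, the error STRING is returned; encoded as none
def sgforA (i : Int) : Option Int :=
  match gforA i with
  | some g => some (digitSumStr g)
  | none => none
-- A's loop body: on the error string, worked -= 1, then 'sum += grab' raises TypeError -> continue
-- (so sum and workedList are untouched); on an int, sum += grab and workedList.append(k)
def stepA (st : Int × Int × List Int) (k : Int) : Int × Int × List Int :=
  match sgforA k with
  | some g => (st.1 + g, st.2.1, st.2.2 ++ [k])
  | none => (st.1, st.2.1 - 1, st.2.2)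

-- the loop state of summforsg: (sum, worked, workedList)
def aCore (ra1 : Int) (ra2 : Int) : Int × Int × List Int :=
  (PySem.List.pyRange ra1 (ra2 + 1) 1).foldl stepA (0, 150, [])

def summforsg (ra1 : Int) (ra2 : Int) : Int × String × String × Int × String × Int :=
  ((aCore ra1 ra2).1, "  ", "worked :", (aCore ra1 ra2).2.1, "  at range:", 2000)

-- ===== PORT B =====
-- Source B: 'if v not in smallest: smallest[v] = n' with v = _digit_sum(sum(math.factorial(int(c)) for c in str(n)))
def bestStep (d : PySem.Dict Int Int) (n : Int) : PySem.Dict Int Int :=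
  let v := sfP n
  if d.contains v then d else d.insert v n
-- Source B's second loop body: n = smallest.get(k); miss -> worked -= 1, hit -> total += _digit_sum(n)
def stepB (best : PySem.Dict Int Int) (st : Int × Int) (k : Int) : Int × Int :=
  match best.get? k with
  | none => (st.1, st.2 - 1)
  | some n => (st.1 + digitSumStr n, st.2)

-- Source B builds this dict at the start of summforsg; it depends on no argument, so it is a constant
def bestD : PySem.Dict Int Int := (PySem.List.pyRange 1 2000 1).foldl bestStep PySem.Dict.empty
-- the second loop's state: (total, worked)
def altCore (ra1 : Int) (ra2 : Int) : Int × Int :=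
  (PySem.List.pyRange ra1 (ra2 + 1) 1).foldl (stepB bestD) (0, 150)

def summforsg_alt (ra1 : Int) (ra2 : Int) : Int × String × String × Int × String × Int :=
  ((altCore ra1 ra2).1, "  ", "worked :", (altCore ra1 ra2).2, "  at range:", 2000)

-- ===== PRECONDITION & SPEC =====
def Spec_summforsg (ra1 : Int) (ra2 : Int) (out : Int × String × String × Int × String × Int) : Prop := out = summforsg_alt ra1 ra2
instance (ra1 : Int) (ra2 : Int) (out : Int × String × String × Int × String × Int) : Decidable (Spec_summforsg ra1 ra2 out) := by unfold Spec_summforsg; infer_instance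

-- ===== CLAIM (what is proved, stated in full; the proofs are below) =====
def Claim_equal_summforsg : Prop := ∀ (ra1 : Int) (ra2 : Int), Dom_summforsg ra1 ra2 → Spec_summforsg ra1 ra2 (summforsg ra1 ra2)

-- ===== LEMMAS AND PROOFS =====
-- lookup in the dict built by bestStep over a 0-free list = first element whose sf-value is the key
lemma build_get? (L : List Int) (hL : ∀ n ∈ L, ¬ n = 0) (d : PySem.Dict Int Int) (k : Int) :
    (L.foldl bestStep d).get? k
      = (d.get? k).or (L.find? (fun n => sfP n == k && !(n == 0))) := by
  induction L generalizing d with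
  | nil => cases h : d.get? k <;> simp [h]
  | cons n L ih =>
    have hn : (!(n == 0)) = true := by simpa using hL n (by simp)
    have hL' : ∀ m ∈ L, ¬ m = 0 := fun m hm => hL m (by simp [hm])
    simp only [List.foldl_cons]
    by_cases hc : d.contains (sfP n)
    · have hstep : bestStep d n = d := by simp [bestStep, hc]
      rw [hstep, ih hL']
      by_cases hv : sfP n = k
      · have : (d.get? k).isSome := by
          rw [← PySem.Dict.contains_eq_isSome_get?]; rw [← hv]; exact hc
        obtain ⟨v, hvv⟩ := Option.isSome_iff_exists.mp this
        simp [hvv]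
      · rw [List.find?_cons_of_neg (by simp [hv])]
    · have hstep : bestStep d n = d.insert (sfP n) n := by simp [bestStep, hc]
      rw [hstep, ih hL']
      by_cases hv : sfP n = k
      · subst hv
        rw [PySem.Dict.get?_insert_self]
        have hd : d.get? (sfP n) = none := by
          rw [PySem.Dict.get?_eq_none_iff_contains]
          simpa using hc
        rw [List.find?_cons_of_pos (by simp [hn])]
        simp [hd]
      · rw [PySem.Dict.get?_insert_of_ne d _ (Ne.symm hv)]
        rw [List.find?_cons_of_neg (by simp [hv])]

-- A's inner scan gfor(k, 2000) computes exactly B's dict lookup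
lemma gforA_eq (k : Int) : gforA k = bestD.get? k := by
  unfold gforA bestD
  rw [build_get? _ (fun n hn => by
        have := (PySem.List.mem_pyRange_one).1 hn; omega) PySem.Dict.empty k]
  rw [PySem.List.pyRange_one_cons (by norm_num : (0:Int) < 2000)]
  rw [List.find?_cons_of_neg (by simp)]
  rw [PySem.Dict.get?_empty]
  norm_num

-- the loop bodies, characterised by the dict lookup (kept generic in d to stay kernel-cheap)
lemma stepB_none (d : PySem.Dict Int Int) (st : Int × Int) (k : Int) (h : d.get? k = none) :
    stepB d st k = (st.1, st.2 - 1) := by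
  unfold stepB; rw [h]

lemma stepB_some (d : PySem.Dict Int Int) (st : Int × Int) (k n : Int) (h : d.get? k = some n) :
    stepB d st k = (st.1 + digitSumStr n, st.2) := by
  unfold stepB; rw [h]

lemma stepA_none (st : Int × Int × List Int) (k : Int) (h : gforA k = none) :
    stepA st k = (st.1, st.2.1 - 1, st.2.2) := by
  unfold stepA sgforA; rw [h]

lemma stepA_some (st : Int × Int × List Int) (k g : Int) (h : gforA k = some g) :
    stepA st k = (st.1 + digitSumStr g, st.2.1, st.2.2 ++ [k]) := by
  unfold stepA sgforA; rw [h]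

-- one loop step of A projects onto one loop step of B
lemma step_rel (st : Int × Int × List Int) (k : Int) :
    ((stepA st k).1, (stepA st k).2.1) = stepB bestD (st.1, st.2.1) k := by
  cases h : bestD.get? k with
  | none => rw [stepB_none _ _ _ h, stepA_none _ _ ((gforA_eq k).trans h)]
  | some n => rw [stepB_some _ _ _ _ h, stepA_some _ _ _ ((gforA_eq k).trans h)]

-- the whole loops agree (workedList is write-only; the projection drops it)
lemma fold_eq (L : List Int) : ∀ (s w : Int) (wl : List Int),
    ((L.foldl stepA (s, w, wl)).1, (L.foldl stepA (s, w, wl)).2.1)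
      = L.foldl (stepB bestD) (s, w) := by
  induction L with
  | nil => intro s w wl; rfl
  | cons k L ih =>
    intro s w wl
    simp only [List.foldl_cons]
    have h := step_rel (s, w, wl) k
    have hih := ih (stepA (s, w, wl) k).1 (stepA (s, w, wl) k).2.1 (stepA (s, w, wl) k).2.2
    rw [hih, h]

-- ===== VERDICT (by name: the statement is the Claim_ definition above) =====
theorem summforsg_spec : Claim_equal_summforsg := by
  intro ra1 ra2 _
  unfold Spec_summforsg summforsg summforsg_alt aCore altCore
  have h := fold_eq (PySem.List.pyRange ra1 (ra2 + 1) 1) 0 150 []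
  have h1 := congrArg Prod.fst h
  have h2 := congrArg Prod.snd h
  simp only at h1 h2
  rw [h1, h2]
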